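-- pv_equiv track=rewrite | github.com/volosincu/traducere-automata-mlc2 | lab_5/consistency.py | get_first_alignment
-- ===== SOURCE A (Python) =====
-- def get_first_alignment(source, m):
--     phrases = list()
--     for i in range(len(m)):
--         new_en = [m[i][0]]
--         for j in range(len(m)):
--             if i != j and abs(i-j) == 1 and not set(m[i][1]).isdisjoint(m[j][1]):
--                 new_en.append(m[j][0])
--         new_en = ' '.join(new_en)
--
--         if new_en in source:
--             phrases.append([new_en, ' '.join(m[i][1])])
--
--     return phrases
-- ===== SOURCE B (Python) =====
-- def get_first_alignment(source, m):
--     phrases = []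
--     n = len(m)
--     prev = None
--     for idx, cur in enumerate(m):
--         nxt = m[idx + 1] if idx + 1 < n else None
--         parts = [cur[0]]
--         if prev is not None and any(w in prev[1] for w in cur[1]):
--             parts.append(prev[0])
--         if nxt is not None and any(w in nxt[1] for w in cur[1]):
--             parts.append(nxt[0])
--         s = ' '.join(parts)
--         if s in source:
--             phrases.append([s, ' '.join(cur[1])])
--         prev = cur
--     return phrases
-- ===== Notes on version B (the rewrite author's own statement) =====
-- stated objective: alternative
-- what changed: A scans all n indices j for every i (rebuilding set(m[i][1]) each time) to find the ones with abs(i-j)==1; B makes a single pass over the list consulting only the previous and the next entry directly.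
import Mathlib
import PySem

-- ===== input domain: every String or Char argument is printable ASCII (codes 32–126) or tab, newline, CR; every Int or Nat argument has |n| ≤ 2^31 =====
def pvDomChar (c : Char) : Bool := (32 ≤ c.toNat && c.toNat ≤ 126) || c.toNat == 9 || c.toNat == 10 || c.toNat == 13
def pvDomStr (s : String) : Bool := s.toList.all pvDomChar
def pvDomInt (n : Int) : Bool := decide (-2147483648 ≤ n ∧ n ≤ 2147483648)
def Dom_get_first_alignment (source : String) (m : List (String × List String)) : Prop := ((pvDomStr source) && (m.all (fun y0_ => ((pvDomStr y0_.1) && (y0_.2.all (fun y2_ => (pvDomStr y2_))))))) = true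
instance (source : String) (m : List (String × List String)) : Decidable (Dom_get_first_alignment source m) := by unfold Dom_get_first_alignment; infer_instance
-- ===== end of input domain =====

-- B replaces A's inner scan over ALL indices j by a single pass over the list that consults
-- only the previous entry and the next entry (the only j with abs(i-j) == 1); same return value.

-- ===== PORT A =====
-- literal port of A: outer loop over range(len(m)); inner loop over range(len(m)) appending
-- m[j][0] when i != j, abs(i-j) == 1 and set(m[i][1]) overlaps m[j][1]
def get_first_alignment (source : String) (m : List (String × List String)) : List (List String) :=
  (PySem.List.pyRange 0 (m.length : Int) 1).foldl (fun phrases i =>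
    if (PySem.Str.isIn
          (PySem.Str.join " "
            ((PySem.List.pyRange 0 (m.length : Int) 1).foldl (fun acc j =>
                if (decide (i ≠ j) && ((i - j).natAbs == 1) &&
                    !(PySem.Set.isdisjoint (PySem.Set.ofList (PySem.List.pyGetD m i ("", [])).2)
                        (PySem.List.pyGetD m j ("", [])).2)) = true
                then acc ++ [(PySem.List.pyGetD m j ("", [])).1] else acc)
              [(PySem.List.pyGetD m i ("", [])).1]))
          source) = true
    then phrases ++
      [[PySem.Str.join " "
          ((PySem.List.pyRange 0 (m.length : Int) 1).foldl (fun acc j =>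
              if (decide (i ≠ j) && ((i - j).natAbs == 1) &&
                  !(PySem.Set.isdisjoint (PySem.Set.ofList (PySem.List.pyGetD m i ("", [])).2)
                      (PySem.List.pyGetD m j ("", [])).2)) = true
              then acc ++ [(PySem.List.pyGetD m j ("", [])).1] else acc)
            [(PySem.List.pyGetD m i ("", [])).1]),
        PySem.Str.join " " (PySem.List.pyGetD m i ("", [])).2]]
    else phrases) []

-- ===== PORT B =====
-- B's helper: any(w in ys for w in ws)
def pvOverlap (ws ys : List String) : Bool := ws.any (fun w => ys.contains w)

-- B's neighbour contribution: the neighbour's english phrase iff the word lists overlap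
def pvNbr (cur : String × List String) (o : Option (String × List String)) : List String :=
  match o with
  | some p => if pvOverlap cur.2 p.2 then [p.1] else []
  | none => []

-- B's single pass: prev is the previous entry (None at the start), rest.head? the next one
def pvAltGo (source : String) : Option (String × List String) → List (String × List String) → List (List String)
  | _, [] => []
  | prev, cur :: rest =>
    let s := PySem.Str.join " " ([cur.1] ++ pvNbr cur prev ++ pvNbr cur rest.head?)
    (if PySem.Str.isIn s source then [[s, PySem.Str.join " " cur.2]] else []) ++
      pvAltGo source (some cur) rest

def get_first_alignment_alt (source : String) (m : List (String × List String)) : List (List String) :=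
  pvAltGo source none m

-- ===== PRECONDITION & SPEC =====
def Spec_get_first_alignment (source : String) (m : List (String × List String)) (out : List (List String)) : Prop := out = get_first_alignment_alt source m
instance (source : String) (m : List (String × List String)) (out : List (List String)) : Decidable (Spec_get_first_alignment source m out) := by unfold Spec_get_first_alignment; infer_instance

-- ===== CLAIM (what is proved, stated in full; the proofs are below) =====
def Claim_equal_get_first_alignment : Prop := ∀ (source : String) (m : List (String × List String)), Dom_get_first_alignment source m → Spec_get_first_alignment source m (get_first_alignment source m)

-- ===== LEMMAS AND PROOFS =====

-- the contribution of the k-th entry, by global indexing: common reference for both ports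
def pvEntry (source : String) (m : List (String × List String)) (k : Nat) : List (List String) :=
  let cur := m.getD k ("", [])
  let s := PySem.Str.join " "
    ([cur.1] ++ pvNbr cur (if k = 0 then none else m[k-1]?) ++ pvNbr cur m[k+1]?)
  if PySem.Str.isIn s source then [[s, PySem.Str.join " " cur.2]] else []

-- A's inner condition and joined phrase, over the Int loop index
def pvCondI (m : List (String × List String)) (i j : Int) : Bool :=
  decide (i ≠ j) && ((i - j).natAbs == 1) &&
    !(PySem.Set.isdisjoint (PySem.Set.ofList (PySem.List.pyGetD m i ("", [])).2)
        (PySem.List.pyGetD m j ("", [])).2)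

def pvJoinI (m : List (String × List String)) (i : Int) : String :=
  PySem.Str.join " "
    ([(PySem.List.pyGetD m i ("", [])).1] ++
      ((PySem.List.pyRange 0 (m.length : Int) 1).filter (pvCondI m i)).map
        (fun j => (PySem.List.pyGetD m j ("", [])).1))

theorem pv_filter_map_eq_flatMap {α β : Type} (p : α → Bool) (f : α → β) (l : List α) :
    (l.filter p).map f = l.flatMap (fun x => if p x then [f x] else []) := by
  induction l with
  | nil => rfl
  | cons x xs ih =>
    by_cases h : p x = true <;> simp [h, ih]

theorem pv_flatMap_congr {α β : Type} {l : List α} {f g : α → List β}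
    (h : ∀ x ∈ l, f x = g x) : l.flatMap f = l.flatMap g := by
  induction l with
  | nil => rfl
  | cons x xs ih =>
    rw [List.flatMap_cons, List.flatMap_cons, h x (List.mem_cons_self),
      ih (fun y hy => h y (List.mem_cons_of_mem _ hy))]

-- A, rewritten as a flatMap over its loop range (pure loop-shape rewriting)
theorem pv_A_step1 (source : String) (m : List (String × List String)) :
    get_first_alignment source m =
      (PySem.List.pyRange 0 (m.length : Int) 1).flatMap (fun i =>
        if PySem.Str.isIn (pvJoinI m i) source = true
        then [[pvJoinI m i, PySem.Str.join " " (PySem.List.pyGetD m i ("", [])).2]]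
        else []) := by
  unfold get_first_alignment
  rw [PySem.List.foldl_append_if
        (fun i => PySem.Str.isIn
          (PySem.Str.join " "
            ((PySem.List.pyRange 0 (m.length : Int) 1).foldl (fun acc j =>
                if (decide (i ≠ j) && ((i - j).natAbs == 1) &&
                    !(PySem.Set.isdisjoint (PySem.Set.ofList (PySem.List.pyGetD m i ("", [])).2)
                        (PySem.List.pyGetD m j ("", [])).2)) = true
                then acc ++ [(PySem.List.pyGetD m j ("", [])).1] else acc)
              [(PySem.List.pyGetD m i ("", [])).1]))
          source)]
  rw [List.nil_append, pv_filter_map_eq_flatMap]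
  simp only [PySem.List.foldl_append_if, pvJoinI, pvCondI]
  rfl

-- filtering a range by a predicate that holds at most at a and b (a < b)
theorem pv_filter_two (r : Nat → Bool) (a b : Nat) (hab : a < b)
    (h : ∀ t, r t = true → t = a ∨ t = b) (n : Nat) :
    (List.range n).filter r =
      (if a < n ∧ r a then [a] else []) ++ (if b < n ∧ r b then [b] else []) := by
  induction n with
  | zero => simp
  | succ n ih =>
    rw [List.range_succ, List.filter_append, ih, List.filter_singleton]
    by_cases hrn : r n = true
    · rcases h n hrn with rfl | rfl
      · have h2 : ¬ (b < n + 1) := by omega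
        have h3 : ¬ (b < n) := by omega
        simp [hrn, h2, h3]
      · have h1 : ¬ (n < n) := by omega
        have h2 : a < n + 1 ↔ a < n := by omega
        simp [hrn, h1, h2]
    · have ea : (a < n + 1 ∧ r a = true) ↔ (a < n ∧ r a = true) := by
        constructor
        · rintro ⟨h1, h2⟩
          refine ⟨?_, h2⟩
          rcases Nat.lt_succ_iff_lt_or_eq.mp h1 with h' | rfl
          · exact h'
          · exact absurd h2 (by simp [hrn])
        · exact fun ⟨h1, h2⟩ => ⟨Nat.lt_succ_of_lt h1, h2⟩
      have eb : (b < n + 1 ∧ r b = true) ↔ (b < n ∧ r b = true) := by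
        constructor
        · rintro ⟨h1, h2⟩
          refine ⟨?_, h2⟩
          rcases Nat.lt_succ_iff_lt_or_eq.mp h1 with h' | rfl
          · exact h'
          · exact absurd h2 (by simp [hrn])
        · exact fun ⟨h1, h2⟩ => ⟨Nat.lt_succ_of_lt h1, h2⟩
      rw [if_congr ea rfl rfl, if_congr eb rfl rfl]
      simp [hrn]

theorem pv_overlap_iff (a b : List String) :
    (!(PySem.Set.isdisjoint (PySem.Set.ofList a) b)) = pvOverlap a b := by
  have h1 : pvOverlap a b = true ↔ ∃ w ∈ a, w ∈ b := by
    simp [pvOverlap]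
  have h2 : (!(PySem.Set.isdisjoint (PySem.Set.ofList a) b)) = true ↔ ∃ w ∈ a, w ∈ b := by
    simp only [Bool.not_eq_true', Bool.eq_false_iff, Ne, PySem.Set.isdisjoint_iff]
    push_neg
    simp [PySem.Set.mem_ofList]
  rw [Bool.eq_iff_iff, h1, h2]

-- A's joined phrase at index t is exactly B's neighbour-based phrase
theorem pv_join_eq (m : List (String × List String)) (t : Nat) (ht : t < m.length) :
    pvJoinI m (t : Int) =
      PySem.Str.join " "
        ([(m.getD t ("", [])).1] ++ pvNbr (m.getD t ("", [])) (if t = 0 then none else m[t-1]?)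
          ++ pvNbr (m.getD t ("", [])) m[t+1]?) := by
  have hyp : ∀ u, (fun u : Nat => pvCondI m (t : Int) (u : Int)) u = true → u = t - 1 ∨ u = t + 1 := by
    intro u hu
    simp only [pvCondI, Bool.and_eq_true, beq_iff_eq, decide_eq_true_eq] at hu
    omega
  have e1 : List.map ((fun j => (PySem.List.pyGetD m j ("", [])).1) ∘ (fun k : Nat => (k : Int)))
      (if t - 1 < m.length ∧ pvCondI m (t:Int) ((t-1 : Nat):Int) = true then [t-1] else [])
      = pvNbr (m.getD t ("", [])) (if t = 0 then none else m[t-1]?) := by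
    by_cases ht0 : t = 0
    · subst ht0
      rw [if_neg (by rintro ⟨-, hco⟩; simp [pvCondI] at hco)]
      simp [pvNbr]
    · have h1t : 1 ≤ t := by omega
      have hne : ((t:Int) ≠ ((t-1:Nat):Int)) := by omega
      have habs : ((t:Int) - ((t-1:Nat):Int)).natAbs = 1 := by omega
      have hlt : t - 1 < m.length := by omega
      have hget : m[t-1]? = some (m.getD (t-1) ("", [])) := by
        rw [List.getElem?_eq_getElem hlt, List.getD_eq_getElem _ _ hlt]
      have hcond : pvCondI m (t:Int) ((t-1:Nat):Int)
          = pvOverlap (m.getD t ("", [])).2 (m.getD (t-1) ("", [])).2 := by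
        unfold pvCondI
        rw [PySem.List.pyGetD_natCast, PySem.List.pyGetD_natCast]
        rw [decide_eq_true hne, beq_iff_eq.mpr habs]
        simp only [Bool.true_and]
        exact pv_overlap_iff _ _
      rw [if_neg ht0, hget]
      by_cases hov : pvOverlap (m.getD t ("", [])).2 (m.getD (t-1) ("", [])).2 = true
      · rw [if_pos ⟨hlt, by rw [hcond]; exact hov⟩]
        simp only [pvNbr]
        rw [if_pos hov]
        simp only [List.map_cons, List.map_nil, Function.comp_apply, PySem.List.pyGetD_natCast]
      · rw [if_neg (by rintro ⟨-, hco⟩; rw [hcond] at hco; exact hov hco)]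
        simp only [pvNbr, List.map_nil]
        rw [if_neg hov]
  have e2 : List.map ((fun j => (PySem.List.pyGetD m j ("", [])).1) ∘ (fun k : Nat => (k : Int)))
      (if t + 1 < m.length ∧ pvCondI m (t:Int) ((t+1 : Nat):Int) = true then [t+1] else [])
      = pvNbr (m.getD t ("", [])) m[t+1]? := by
    by_cases h2 : t + 1 < m.length
    · have hne : ((t:Int) ≠ ((t+1:Nat):Int)) := by omega
      have habs : ((t:Int) - ((t+1:Nat):Int)).natAbs = 1 := by omega
      have hget : m[t+1]? = some (m.getD (t+1) ("", [])) := by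
        rw [List.getElem?_eq_getElem h2, List.getD_eq_getElem _ _ h2]
      have hcond : pvCondI m (t:Int) ((t+1:Nat):Int)
          = pvOverlap (m.getD t ("", [])).2 (m.getD (t+1) ("", [])).2 := by
        unfold pvCondI
        rw [PySem.List.pyGetD_natCast, PySem.List.pyGetD_natCast]
        rw [decide_eq_true hne, beq_iff_eq.mpr habs]
        simp only [Bool.true_and]
        exact pv_overlap_iff _ _
      rw [hget]
      by_cases hov : pvOverlap (m.getD t ("", [])).2 (m.getD (t+1) ("", [])).2 = true
      · rw [if_pos ⟨h2, by rw [hcond]; exact hov⟩]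
        simp only [pvNbr]
        rw [if_pos hov]
        simp only [List.map_cons, List.map_nil, Function.comp_apply, PySem.List.pyGetD_natCast]
      · rw [if_neg (by rintro ⟨-, hco⟩; rw [hcond] at hco; exact hov hco)]
        simp only [pvNbr, List.map_nil]
        rw [if_neg hov]
    · have hget : m[t+1]? = none := by
        rw [List.getElem?_eq_none]
        omega
      rw [if_neg (by rintro ⟨hlt2, -⟩; exact h2 hlt2), hget]
      simp [pvNbr]
  rw [pvJoinI, PySem.List.pyRange_one]
  simp only [Int.sub_zero, Int.toNat_natCast, Int.zero_add, List.filter_map, List.map_map]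
  rw [show ((pvCondI m (t:Int)) ∘ (fun k : Nat => ((k : Int)))) = (fun u : Nat => pvCondI m (t:Int) (u:Int)) from rfl]
  rw [pv_filter_two _ (t-1) (t+1) (by omega) hyp m.length, List.map_append]
  rw [e1, e2, PySem.List.pyGetD_natCast]
  conv_rhs => rw [List.append_assoc]

theorem pv_A_eq (source : String) (m : List (String × List String)) :
    get_first_alignment source m = (List.range m.length).flatMap (pvEntry source m) := by
  rw [pv_A_step1, PySem.List.pyRange_one]
  simp only [Int.sub_zero, Int.toNat_natCast, List.flatMap_map, Int.zero_add]
  apply pv_flatMap_congr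
  intro t htm
  have ht : t < m.length := List.mem_range.mp htm
  rw [pv_join_eq m t ht, PySem.List.pyGetD_natCast]
  rfl

theorem pv_B_eq (source : String) (m : List (String × List String)) :
    ∀ (l pre : List (String × List String)), m = pre ++ l →
      pvAltGo source pre.getLast? l =
        (List.range l.length).flatMap (fun t => pvEntry source m (pre.length + t)) := by
  intro l
  induction l with
  | nil => intro pre _; simp [pvAltGo]
  | cons cur rest ih =>
    intro pre hm
    have hcur : m.getD pre.length ("", []) = cur := by
      subst hm
      rw [List.getD_eq_getElem?_getD, List.getElem?_append_right (Nat.le_refl _)]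
      simp
    have hprev : (if pre.length = 0 then none else m[pre.length - 1]?) = pre.getLast? := by
      subst hm
      cases pre with
      | nil => simp
      | cons p ps =>
        simp only [List.length_cons, Nat.add_sub_cancel]
        rw [if_neg (by simp)]
        rw [List.getElem?_append_left (by simp)]
        rw [List.getLast?_eq_getElem?]
        simp
    have hnext : m[pre.length + 1]? = rest.head? := by
      subst hm
      rw [List.getElem?_append_right (by omega)]
      simp [List.head?_eq_getElem?]
    have hstep := ih (pre ++ [cur]) (by simp [hm])
    rw [List.getLast?_concat] at hstep
    simp only [pvAltGo, hstep]
    rw [List.length_cons, List.range_succ_eq_map]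
    rw [List.flatMap_cons, List.flatMap_map]
    refine congr_arg₂ (· ++ ·) ?_ ?_
    · simp only [pvEntry, Nat.add_zero, hcur, hprev, hnext]
    · apply pv_flatMap_congr
      intro t _
      have h : (pre ++ [cur]).length + t = pre.length + Nat.succ t := by
        simp [List.length_append]
        omega
      rw [h]

-- ===== VERDICT (by name: the statement is the Claim_ definition above) =====
theorem get_first_alignment_spec : Claim_equal_get_first_alignment := by
  intro source m _
  unfold Spec_get_first_alignment
  rw [pv_A_eq]
  have hB := pv_B_eq source m m [] rfl
  simp only [List.getLast?_nil, List.length_nil, Nat.zero_add] at hB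
  unfold get_first_alignment_alt
  rw [hB]
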